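-- pv_equiv track=rewrite | github.com/jhonatanaxtool1-bit/gest-o-de-ideias | bot - secretaria da minha vida/assistant/bot.py | _match_interest_intelligent
-- ===== SOURCE A (Python) =====
-- def _normalize(s: str) -> str:
--     """Normaliza para comparação: strip e colapsa espaços múltiplos."""
--     return " ".join((s or "").strip().lower().split())
--
-- def _match_interest_intelligent(user_input: str, interests: list[dict]) -> dict | None:
--     """
--     Busca inteligente: exato > nome começa com o que o usuário disse > nome contém.
--     Usa normalização (espaços colapsados) para evitar falhas por diferença de espaços.
--     """
--     if not (user_input and user_input.strip()) or not interests: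
--         return None
--     key = _normalize(user_input)
--     exact = next((i for i in interests if _normalize(i.get("name") or "") == key), None)
--     if exact:
--         return exact
--     starts = next(
--         (i for i in interests if _normalize(i.get("name") or "").startswith(key)),
--         None,
--     )
--     if starts:
--         return starts
--     containing = [i for i in interests if key in _normalize(i.get("name") or "")]
--     if containing:
--         return min(containing, key=lambda i: len((i.get("name") or "")))
--     return None
-- ===== SOURCE B (Python) =====
-- def _normalize(s: str) -> str:
--     return " ".join((s or "").strip().lower().split())
--
-- def _match_interest_intelligent(user_input: str, interests: list) -> dict | None:
--     # Single ranking pass: each interest gets a composite key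
--     # (rank, tiebreak) -- rank 0 exact, 1 prefix, 2 contains; tiebreak is the
--     # original name's length, used only at rank 2 -- and the first strict
--     # minimum wins.
--     if not (user_input and user_input.strip()) or not interests:
--         return None
--     key = _normalize(user_input)
--     best_key = None
--     best = None
--     for i in interests:
--         name = _normalize(i.get("name") or "")
--         if name == key:
--             k = (0, 0)
--         elif name.startswith(key):
--             k = (1, 0)
--         elif key in name:
--             k = (2, len(i.get("name") or ""))
--         else:
--             continue
--         if best_key is None or k < best_key:
--             best_key = k
--             best = i
--     return best
-- ===== Notes on version B (the rewrite author's own statement) =====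
-- stated objective: alternative
-- what changed: A's three sequential scans (find exact match, then find prefix match, then filter contains-matches and take min by original-name length) are collapsed into one pass that ranks every interest with a composite (rank, tiebreak) key and keeps the first strict minimum, normalizing each name once instead of up to three times.
import Mathlib
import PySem

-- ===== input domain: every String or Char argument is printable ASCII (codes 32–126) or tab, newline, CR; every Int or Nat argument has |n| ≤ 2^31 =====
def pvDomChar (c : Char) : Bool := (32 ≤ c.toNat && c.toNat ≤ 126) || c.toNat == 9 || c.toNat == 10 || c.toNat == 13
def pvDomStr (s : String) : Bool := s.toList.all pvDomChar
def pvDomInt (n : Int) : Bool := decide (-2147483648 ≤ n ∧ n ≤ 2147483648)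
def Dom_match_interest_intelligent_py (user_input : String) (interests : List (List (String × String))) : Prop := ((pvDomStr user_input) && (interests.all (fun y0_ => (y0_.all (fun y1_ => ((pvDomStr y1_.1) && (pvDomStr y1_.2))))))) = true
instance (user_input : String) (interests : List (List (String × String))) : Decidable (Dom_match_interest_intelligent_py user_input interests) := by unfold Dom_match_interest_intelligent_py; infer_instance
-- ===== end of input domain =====

-- B replaces A's three sequential scans (exact / startswith / contains+min) by a single ranking
-- pass that keeps the first strict minimum of a composite (rank, tiebreak) key; same return value.

-- ===== PORT A =====
-- i.get("name") or ""  (the 'or ""' only turns a missing or empty name into "", i.e. getD with default "")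
def pvName (i : List (String × String)) : String :=
  PySem.Dict.getD (PySem.Dict.mk i) "name" ""

-- _normalize: " ".join(s.strip().lower().split())
def pvNormalize (s : String) : String :=
  PySem.Str.join " " (PySem.Str.split₀ (PySem.Str.lower (PySem.Str.strip s)))

def match_interest_intelligent_py (user_input : String) (interests : List (List (String × String))) : Option (List (String × String)) :=
  -- if not (user_input and user_input.strip()) or not interests: return None
  if !(user_input != "" && PySem.Str.strip user_input != "") || interests.isEmpty then none
  else
    let key := pvNormalize user_input
    -- containing = [...]; if containing: return min(containing, key=lambda i: len(i.get("name") or ""))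
    let containingRes :=
      let containing := interests.filter (fun i => PySem.Str.isIn key (pvNormalize (pvName i)))
      if containing.isEmpty then none
      else PySem.List.min? containing (fun i => PySem.Str.len (pvName i))
    -- starts = next(..., None); if starts: return starts  ('if starts' is Python truthiness: a found empty dict is falsy)
    let startsRes :=
      match interests.find? (fun i => PySem.Str.startswith (pvNormalize (pvName i)) key) with
      | some d => if d.isEmpty then containingRes else some d
      | none => containingRes
    -- exact = next(..., None); if exact: return exact
    match interests.find? (fun i => pvNormalize (pvName i) == key) with
    | some d => if d.isEmpty then startsRes else some d
    | none => startsRes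

-- ===== PORT B =====
-- Python's tuple comparison (rank, tiebreak) < (rank', tiebreak'): lexicographic
def pvLexLt (k k' : Nat × Int) : Bool :=
  k.1 < k'.1 || (k.1 == k'.1 && k.2 < k'.2)

-- the if/elif/elif/else-continue chain of Source B's loop body: the composite key of one interest
-- (none = 'continue', i.e. no match)
def pvRk (key : String) (i : List (String × String)) : Option (Nat × Int) :=
  if pvNormalize (pvName i) == key then some (0, 0)
  else if PySem.Str.startswith (pvNormalize (pvName i)) key then some (1, 0)
  else if PySem.Str.isIn key (pvNormalize (pvName i)) then some (2, PySem.Str.len (pvName i))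
  else none

-- one iteration of Source B's loop (state = (best_key, best))
def pvStepB (key : String) (st : Option (Nat × Int) × Option (List (String × String)))
    (i : List (String × String)) : Option (Nat × Int) × Option (List (String × String)) :=
  match pvRk key i with
  | none => st          -- continue
  | some k =>
    match st.1 with     -- if best_key is None or k < best_key
    | none => (some k, some i)
    | some bk => if pvLexLt k bk then (some k, some i) else st

def match_interest_intelligent_py_alt (user_input : String) (interests : List (List (String × String))) : Option (List (String × String)) :=
  if !(user_input != "" && PySem.Str.strip user_input != "") || interests.isEmpty then none
  else
    let key := pvNormalize user_input
    (interests.foldl (pvStepB key) (none, none)).2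

-- ===== PRECONDITION & SPEC =====
def Spec_match_interest_intelligent_py (user_input : String) (interests : List (List (String × String))) (out : Option (List (String × String))) : Prop := out = match_interest_intelligent_py_alt user_input interests
instance (user_input : String) (interests : List (List (String × String))) (out : Option (List (String × String))) : Decidable (Spec_match_interest_intelligent_py user_input interests out) := by unfold Spec_match_interest_intelligent_py; infer_instance

-- ===== CLAIM (what is proved, stated in full; the proofs are below) =====
def Claim_equal_match_interest_intelligent_py : Prop := ∀ (user_input : String) (interests : List (List (String × String))), Dom_match_interest_intelligent_py user_input interests → Spec_match_interest_intelligent_py user_input interests (match_interest_intelligent_py user_input interests)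

-- ===== LEMMAS AND PROOFS =====

-- keep x unless y is strictly smaller (Python's 'k < best_key' update: first minimum wins)
def pvComb (x y : Option ((Nat × Int) × List (String × String))) : Option ((Nat × Int) × List (String × String)) :=
  match x, y with
  | none, y => y
  | some x, none => some x
  | some (k, d), some (k', d') => if pvLexLt k' k then some (k', d') else some (k, d)

-- the first minimum of the ranked list, computed structurally
def pvBestOf (key : String) : List (List (String × String)) → Option ((Nat × Int) × List (String × String))
  | [] => none
  | i :: t => pvComb ((pvRk key i).map (fun k => (k, i))) (pvBestOf key t)

def pvEnc (x : Option ((Nat × Int) × List (String × String))) : Option (Nat × Int) × Option (List (String × String)) :=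
  match x with
  | none => (none, none)
  | some (k, d) => (some k, some d)

theorem pvLexLt_trans {a b c : Nat × Int} (h1 : pvLexLt a b = true) (h2 : pvLexLt b c = true) : pvLexLt a c = true := by
  simp only [pvLexLt, Bool.or_eq_true, Bool.and_eq_true, decide_eq_true_eq, beq_iff_eq] at *
  omega

theorem pvLexLt_not_trans {a b c : Nat × Int} (h1 : pvLexLt a b = false) (h2 : pvLexLt b c = false) : pvLexLt a c = false := by
  simp only [pvLexLt, Bool.or_eq_false_iff, Bool.and_eq_false_iff, decide_eq_false_iff_not, beq_eq_false_iff_ne, ne_eq] at *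
  omega

theorem pvComb_assoc (a b c : Option ((Nat × Int) × List (String × String))) :
    pvComb (pvComb a b) c = pvComb a (pvComb b c) := by
  match a, b, c with
  | none, _, _ => rfl
  | some _, none, _ => rfl
  | some (k, d), some (k', d'), none =>
    simp only [pvComb]; by_cases h : pvLexLt k' k = true <;> simp [h]
  | some (k, d), some (k', d'), some (k'', d'') =>
    simp only [pvComb]
    by_cases h1 : pvLexLt k' k = true <;> by_cases h2 : pvLexLt k'' k' = true
    · simp [h1, h2, pvLexLt_trans h2 h1]
    · simp [h1, h2]
    · simp [h1, h2]
    · rw [Bool.not_eq_true] at h1 h2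
      simp [h1, h2, pvLexLt_not_trans h2 h1]

-- B's fold is pvComb-accumulation of pvBestOf
theorem pvFoldB (key : String) (l : List (List (String × String))) (b : Option ((Nat × Int) × List (String × String))) :
    l.foldl (pvStepB key) (pvEnc b) = pvEnc (pvComb b (pvBestOf key l)) := by
  induction l generalizing b with
  | nil => cases b with
    | none => rfl
    | some x => rfl
  | cons i t ih =>
    rw [List.foldl_cons]
    have hb : pvStepB key (pvEnc b) i = pvEnc (pvComb b ((pvRk key i).map (fun k => (k, i)))) := by
      rw [pvStepB]
      cases hr : pvRk key i with
      | none =>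
        cases b with
        | none => rfl
        | some x => rfl
      | some k =>
        cases b with
        | none => rfl
        | some x =>
          obtain ⟨bk, bd⟩ := x
          simp only [Option.map_some, pvEnc, pvComb]
          by_cases hlt : pvLexLt k bk = true <;> simp [hlt]
    rw [hb, ih, pvComb_assoc]
    simp [pvBestOf]

-- min with key, peeled one element (PySem.List.min? is the first-minimum fold)
def pvMinStep (f : List (String × String) → Int) (acc : Option (List (String × String)))
    (x : List (String × String)) : Option (List (String × String)) :=
  match acc with
  | none => some x
  | some m => if f x < f m then some x else some m

theorem pvMin?_eq_foldl (f : List (String × String) → Int) (xs : List (List (String × String))) :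
    PySem.List.min? xs f = xs.foldl (pvMinStep f) none := by
  unfold PySem.List.min?
  congr 1
  funext acc x
  cases acc <;> rfl

theorem pvFoldMinAux (f : List (String × String) → Int) (xs : List (List (String × String))) :
    ∀ x, xs.foldl (pvMinStep f) (some x) =
      match xs.foldl (pvMinStep f) none with
      | none => some x
      | some m => if f m < f x then some m else some x := by
  induction xs with
  | nil => intro x; rfl
  | cons y ys ih =>
    intro x
    rw [List.foldl_cons, List.foldl_cons]
    have hy : pvMinStep f none y = some y := rfl
    rw [hy]
    have hx : pvMinStep f (some x) y = if f y < f x then some y else some x := rfl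
    rw [hx]
    by_cases hyx : f y < f x
    · rw [if_pos hyx, ih y]
      cases hN : ys.foldl (pvMinStep f) none with
      | none => simp [hyx]
      | some m =>
        by_cases hmy : f m < f y
        · have hmx : f m < f x := by linarith
          simp [hmy, hmx]
        · simp [hmy, hyx]
    · rw [if_neg hyx, ih x, ih y]
      cases hN : ys.foldl (pvMinStep f) none with
      | none => simp [hyx]
      | some m =>
        by_cases hmy : f m < f y
        · simp [hmy]
        · have hmx : ¬ f m < f x := by
            intro hc
            rcases lt_or_ge (f y) (f m) with h' | h'
            · exact hyx (by linarith)
            · exact hmy (by linarith)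
          simp [hmy, hmx, hyx]

theorem pvMin?_cons (f : List (String × String) → Int) (x : List (String × String)) (xs : List (List (String × String))) :
    PySem.List.min? (x :: xs) f =
      match PySem.List.min? xs f with
      | none => some x
      | some m => if f m < f x then some m else some x := by
  rw [pvMin?_eq_foldl, pvMin?_eq_foldl, List.foldl_cons]
  have : pvMinStep f none x = some x := rfl
  rw [this, pvFoldMinAux]

-- ---------- predicate implications and non-emptiness ----------

theorem pvNormalize_empty : pvNormalize "" = "" := by decide

theorem pvP0_ne_nil {key : String} (hkey : key ≠ "") {i : List (String × String)}
    (h : (pvNormalize (pvName i) == key) = true) : i ≠ [] := by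
  intro h0; subst h0
  rw [show pvName [] = "" from rfl, pvNormalize_empty, beq_iff_eq] at h
  exact hkey h.symm

theorem pvP1_ne_nil {key : String} (hkey : key ≠ "") {i : List (String × String)}
    (h : PySem.Str.startswith (pvNormalize (pvName i)) key = true) : i ≠ [] := by
  intro h0; subst h0
  rw [show pvName [] = "" from rfl, pvNormalize_empty, PySem.Str.startswith,
    PySem.Chars.startswith] at h
  rw [List.isPrefixOf_iff_prefix] at h
  have : key.toList = [] := List.prefix_nil.1 (by simpa using h)
  exact hkey (String.toList_eq_nil_iff.1 this)

-- ---------- the normalized key of a non-whitespace input is nonempty ----------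

theorem pvSplitGo_ne_nil (l : List Char) (cur : List Char) (acc : List (List Char))
    (h : (∃ c ∈ l, PySem.Chars.isspace c = false) ∨ cur ≠ [] ∨ acc ≠ []) :
    PySem.Chars.split₀.go l cur acc ≠ [] := by
  induction l generalizing cur acc with
  | nil =>
    rw [PySem.Chars.split₀.go.eq_def]
    dsimp only
    rcases h with ⟨c, hc, _⟩ | hcur | hacc
    · simp at hc
    · rw [if_neg (by simpa [List.isEmpty_iff] using hcur)]
      simp
    · by_cases hc : cur.isEmpty = true
      · rw [if_pos hc]; simpa using hacc
      · rw [if_neg hc]; simp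
  | cons c rest ih =>
    rw [PySem.Chars.split₀.go.eq_def]
    dsimp only
    by_cases hws : PySem.Chars.isspace c = true
    · rw [if_pos hws]
      by_cases hc : cur.isEmpty = true
      · rw [if_pos hc]
        apply ih
        rcases h with ⟨x, hx, hxs⟩ | hcur | hacc
        · rcases List.mem_cons.1 hx with rfl | hx'
          · rw [hws] at hxs; cases hxs
          · exact Or.inl ⟨x, hx', hxs⟩
        · exact absurd (List.isEmpty_iff.1 hc) hcur
        · exact Or.inr (Or.inr hacc)
      · rw [if_neg hc]
        exact ih _ _ (Or.inr (Or.inr (by simp)))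
    · rw [if_neg hws]
      exact ih _ _ (Or.inr (Or.inl (by simp)))

theorem pvSplitGo_pieces (l : List Char) (cur : List Char) (acc : List (List Char))
    (hacc : ∀ p ∈ acc, p ≠ []) : ∀ p ∈ PySem.Chars.split₀.go l cur acc, p ≠ [] := by
  induction l generalizing cur acc with
  | nil =>
    rw [PySem.Chars.split₀.go.eq_def]
    dsimp only
    by_cases hc : cur.isEmpty = true
    · rw [if_pos hc]
      intro p hp
      exact hacc p (List.mem_reverse.1 hp)
    · rw [if_neg hc]
      intro p hp
      rw [List.mem_reverse] at hp
      rcases List.mem_cons.1 hp with rfl | hp'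
      · simpa [List.isEmpty_iff] using hc
      · exact hacc p hp'
  | cons c rest ih =>
    rw [PySem.Chars.split₀.go.eq_def]
    dsimp only
    by_cases hws : PySem.Chars.isspace c = true
    · rw [if_pos hws]
      by_cases hc : cur.isEmpty = true
      · rw [if_pos hc]; exact ih _ _ hacc
      · rw [if_neg hc]
        apply ih
        intro p hp
        rcases List.mem_cons.1 hp with rfl | hp'
        · simpa [List.isEmpty_iff] using hc
        · exact hacc p hp'
    · rw [if_neg hws]
      exact ih _ _ hacc

theorem pvJoin_ne_nil (sep : List Char) (parts : List (List Char)) (h1 : parts ≠ [])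
    (h2 : ∀ p ∈ parts, p ≠ []) : PySem.Chars.join sep parts ≠ [] := by
  match parts with
  | [] => exact absurd rfl h1
  | [p] =>
    rw [PySem.Chars.join_singleton]
    exact h2 p (by simp)
  | p :: q :: rest =>
    rw [PySem.Chars.join_cons_cons]
    have := h2 p (by simp)
    simp [this]

theorem pvNotSpace_lowerChar {c : Char} (h : PySem.Chars.isspace c = false) :
    PySem.Chars.isspace (PySem.Chars.lowerChar c) = false := by
  rw [PySem.Chars.lowerChar]
  by_cases hu : PySem.Chars.isupper c = true
  · rw [if_pos hu]
    rw [PySem.Chars.isupper, Bool.and_eq_true, decide_eq_true_eq, decide_eq_true_eq] at hu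
    have h65 : 65 ≤ c.toNat := hu.1
    have h90 : c.toNat ≤ 90 := hu.2
    have key : ∀ m : Nat, m < 91 → 65 ≤ m → PySem.Chars.isspace (Char.ofNat (m + 32)) = false := by decide
    exact key c.toNat (by omega) h65
  · rw [if_neg hu]; exact h

theorem pvStrip_has_char (L : List Char) (h : PySem.Chars.strip L ≠ []) :
    ∃ c ∈ PySem.Chars.strip L, PySem.Chars.isspace c = false := by
  have hstrip : PySem.Chars.strip L =
      (List.dropWhile PySem.Chars.isspace (PySem.Chars.lstrip L).reverse).reverse := rfl
  rw [hstrip] at h ⊢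
  have hdne : List.dropWhile PySem.Chars.isspace (PySem.Chars.lstrip L).reverse ≠ [] := by
    intro h0; exact h (by rw [h0]; rfl)
  refine ⟨(List.dropWhile PySem.Chars.isspace (PySem.Chars.lstrip L).reverse).head hdne, ?_, ?_⟩
  · rw [List.mem_reverse]; exact List.head_mem hdne
  · exact List.head_dropWhile_not _ hdne

theorem pvKey_ne_empty (s : String) (h : PySem.Str.strip s ≠ "") : pvNormalize s ≠ "" := by
  intro h0
  have hL : PySem.Chars.strip s.toList ≠ [] := by
    intro hx
    apply h
    have : PySem.Str.strip s = String.ofList (PySem.Chars.strip s.toList) := rfl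
    rw [this, hx]
  have hex := pvStrip_has_char _ hL
  have hex2 : ∃ c ∈ PySem.Chars.lower (PySem.Chars.strip s.toList), PySem.Chars.isspace c = false := by
    obtain ⟨c, hc, hcs⟩ := hex
    exact ⟨PySem.Chars.lowerChar c, List.mem_map_of_mem hc, pvNotSpace_lowerChar hcs⟩
  have h1 := pvSplitGo_ne_nil (PySem.Chars.lower (PySem.Chars.strip s.toList)) [] [] (Or.inl hex2)
  have h2 := pvSplitGo_pieces (PySem.Chars.lower (PySem.Chars.strip s.toList)) [] [] (by simp)
  have hjoin : PySem.Chars.join [' ']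
      (PySem.Chars.split₀ (PySem.Chars.lower (PySem.Chars.strip s.toList))) ≠ [] :=
    pvJoin_ne_nil _ _ h1 h2
  apply hjoin
  have hlist := congrArg String.toList h0
  rw [pvNormalize, PySem.Str.toList_join] at hlist
  simpa [PySem.Str.split₀, List.map_map, Function.comp_def, String.toList_ofList, List.map_id,
    PySem.Str.toList_lower, PySem.Str.toList_strip] using hlist

-- ---------- characterization of pvBestOf by A's three scans ----------

theorem pvBestOf_spec (key : String) (l : List (List (String × String))) :
    (pvBestOf key l = none →
      l.find? (fun i => pvNormalize (pvName i) == key) = none ∧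
      l.find? (fun i => PySem.Str.startswith (pvNormalize (pvName i)) key) = none ∧
      l.filter (fun i => PySem.Str.isIn key (pvNormalize (pvName i))) = []) ∧
    (∀ k d, pvBestOf key l = some (k, d) →
      (k = (0, 0) ∧ l.find? (fun i => pvNormalize (pvName i) == key) = some d)
      ∨ (k = (1, 0) ∧ l.find? (fun i => pvNormalize (pvName i) == key) = none ∧
          l.find? (fun i => PySem.Str.startswith (pvNormalize (pvName i)) key) = some d)
      ∨ (k = (2, PySem.Str.len (pvName d)) ∧
          l.find? (fun i => pvNormalize (pvName i) == key) = none ∧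
          l.find? (fun i => PySem.Str.startswith (pvNormalize (pvName i)) key) = none ∧
          PySem.List.min? (l.filter (fun i => PySem.Str.isIn key (pvNormalize (pvName i))))
            (fun i => PySem.Str.len (pvName i)) = some d)) := by
  induction l with
  | nil =>
    refine ⟨fun _ => ⟨rfl, rfl, rfl⟩, fun k d h => ?_⟩
    simp [pvBestOf] at h
  | cons i t ih =>
    by_cases h0 : (pvNormalize (pvName i) == key) = true
    · -- exact match at the head: rank (0,0), nothing later can beat it
      have hrk : pvRk key i = some (0, 0) := by simp only [pvRk]; rw [if_pos h0]
      have hEq : pvBestOf key (i :: t) = some ((0, 0), i) := by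
        rw [pvBestOf, hrk]
        cases hbt : pvBestOf key t with
        | none => rfl
        | some kd =>
          obtain ⟨k', d'⟩ := kd
          rcases ih.2 k' d' hbt with ⟨rfl, _⟩ | ⟨rfl, _, _⟩ | ⟨rfl, _, _, _⟩ <;>
            simp [pvComb, pvLexLt]
      refine ⟨fun hn => ?_, fun k d hs => ?_⟩
      · rw [hEq] at hn; cases hn
      · rw [hEq] at hs
        simp only [Option.some.injEq, Prod.mk.injEq] at hs
        obtain ⟨rfl, rfl⟩ := hs
        exact Or.inl ⟨rfl, List.find?_cons_of_pos (by simpa using h0)⟩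
    · by_cases h1 : PySem.Str.startswith (pvNormalize (pvName i)) key = true
      · -- prefix match at the head: rank (1,0); only an exact match in the tail beats it
        have hrk : pvRk key i = some (1, 0) := by simp only [pvRk]; rw [if_neg h0, if_pos h1]
        cases hbt : pvBestOf key t with
        | none =>
          obtain ⟨hf0t, hf1t, _⟩ := ih.1 hbt
          have hEq : pvBestOf key (i :: t) = some ((1, 0), i) := by
            rw [pvBestOf, hrk, hbt]; rfl
          refine ⟨fun hn => ?_, fun k d hs => ?_⟩
          · rw [hEq] at hn; cases hn
          · rw [hEq] at hs
            simp only [Option.some.injEq, Prod.mk.injEq] at hs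
            obtain ⟨rfl, rfl⟩ := hs
            refine Or.inr (Or.inl ⟨rfl, ?_, ?_⟩)
            · rw [List.find?_cons_of_neg (by simpa using h0)]; exact hf0t
            · exact List.find?_cons_of_pos (by simpa using h1)
        | some kd =>
          obtain ⟨k', d'⟩ := kd
          rcases ih.2 k' d' hbt with ⟨rfl, hf0t⟩ | ⟨rfl, hf0t, hf1t⟩ | ⟨rfl, hf0t, hf1t, hmint⟩
          · -- tail has an exact match: it wins
            have hEq : pvBestOf key (i :: t) = some ((0, 0), d') := by
              rw [pvBestOf, hrk, hbt]; simp [pvComb, pvLexLt]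
            refine ⟨fun hn => ?_, fun k d hs => ?_⟩
            · rw [hEq] at hn; cases hn
            · rw [hEq] at hs
              simp only [Option.some.injEq, Prod.mk.injEq] at hs
              obtain ⟨rfl, rfl⟩ := hs
              refine Or.inl ⟨rfl, ?_⟩
              rw [List.find?_cons_of_neg (by simpa using h0)]; exact hf0t
          · -- tail best is also rank 1: head (first) wins
            have hEq : pvBestOf key (i :: t) = some ((1, 0), i) := by
              rw [pvBestOf, hrk, hbt]; simp [pvComb, pvLexLt]
            refine ⟨fun hn => ?_, fun k d hs => ?_⟩
            · rw [hEq] at hn; cases hn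
            · rw [hEq] at hs
              simp only [Option.some.injEq, Prod.mk.injEq] at hs
              obtain ⟨rfl, rfl⟩ := hs
              refine Or.inr (Or.inl ⟨rfl, ?_, ?_⟩)
              · rw [List.find?_cons_of_neg (by simpa using h0)]; exact hf0t
              · exact List.find?_cons_of_pos (by simpa using h1)
          · -- tail best is rank 2: head rank 1 wins
            have hEq : pvBestOf key (i :: t) = some ((1, 0), i) := by
              rw [pvBestOf, hrk, hbt]; simp [pvComb, pvLexLt]
            refine ⟨fun hn => ?_, fun k d hs => ?_⟩
            · rw [hEq] at hn; cases hn
            · rw [hEq] at hs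
              simp only [Option.some.injEq, Prod.mk.injEq] at hs
              obtain ⟨rfl, rfl⟩ := hs
              refine Or.inr (Or.inl ⟨rfl, ?_, ?_⟩)
              · rw [List.find?_cons_of_neg (by simpa using h0)]; exact hf0t
              · exact List.find?_cons_of_pos (by simpa using h1)
      · by_cases h2 : PySem.Str.isIn key (pvNormalize (pvName i)) = true
        · -- contains-only match at the head: rank (2, len of original name)
          have hrk : pvRk key i = some (2, PySem.Str.len (pvName i)) := by simp only [pvRk]; rw [if_neg h0, if_neg h1, if_pos h2]
          cases hbt : pvBestOf key t with
          | none =>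
            obtain ⟨hf0t, hf1t, hfilt⟩ := ih.1 hbt
            have hEq : pvBestOf key (i :: t) = some ((2, PySem.Str.len (pvName i)), i) := by
              rw [pvBestOf, hrk, hbt]; rfl
            refine ⟨fun hn => ?_, fun k d hs => ?_⟩
            · rw [hEq] at hn; cases hn
            · rw [hEq] at hs
              simp only [Option.some.injEq, Prod.mk.injEq] at hs
              obtain ⟨rfl, rfl⟩ := hs
              refine Or.inr (Or.inr ⟨rfl, ?_, ?_, ?_⟩)
              · rw [List.find?_cons_of_neg (by simpa using h0)]; exact hf0t
              · rw [List.find?_cons_of_neg (by simpa using h1)]; exact hf1t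
              · rw [List.filter_cons_of_pos (by simpa using h2), hfilt, pvMin?_cons]
                rfl
          | some kd =>
            obtain ⟨k', d'⟩ := kd
            rcases ih.2 k' d' hbt with ⟨rfl, hf0t⟩ | ⟨rfl, hf0t, hf1t⟩ | ⟨rfl, hf0t, hf1t, hmint⟩
            · have hEq : pvBestOf key (i :: t) = some ((0, 0), d') := by
                rw [pvBestOf, hrk, hbt]; simp [pvComb, pvLexLt]
              refine ⟨fun hn => ?_, fun k d hs => ?_⟩
              · rw [hEq] at hn; cases hn
              · rw [hEq] at hs
                simp only [Option.some.injEq, Prod.mk.injEq] at hs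
                obtain ⟨rfl, rfl⟩ := hs
                refine Or.inl ⟨rfl, ?_⟩
                rw [List.find?_cons_of_neg (by simpa using h0)]; exact hf0t
            · have hEq : pvBestOf key (i :: t) = some ((1, 0), d') := by
                rw [pvBestOf, hrk, hbt]; simp [pvComb, pvLexLt]
              refine ⟨fun hn => ?_, fun k d hs => ?_⟩
              · rw [hEq] at hn; cases hn
              · rw [hEq] at hs
                simp only [Option.some.injEq, Prod.mk.injEq] at hs
                obtain ⟨rfl, rfl⟩ := hs
                refine Or.inr (Or.inl ⟨rfl, ?_, ?_⟩)
                · rw [List.find?_cons_of_neg (by simpa using h0)]; exact hf0t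
                · rw [List.find?_cons_of_neg (by simpa using h1)]; exact hf1t
            · -- both head and tail best are rank 2: smaller original-name length wins, ties to the tail? no — ties to the FIRST, i.e. the head
              have hlex : pvLexLt (2, PySem.Str.len (pvName d')) (2, PySem.Str.len (pvName i))
                  = decide (PySem.Str.len (pvName d') < PySem.Str.len (pvName i)) := by
                simp [pvLexLt]
              have hmin2 : PySem.List.min? ((i :: t).filter (fun i => PySem.Str.isIn key (pvNormalize (pvName i))))
                  (fun i => PySem.Str.len (pvName i)) =
                  if PySem.Str.len (pvName d') < PySem.Str.len (pvName i) then some d' else some i := by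
                rw [List.filter_cons_of_pos (by simpa using h2), pvMin?_cons, hmint]
              by_cases hlt : PySem.Str.len (pvName d') < PySem.Str.len (pvName i)
              · have hEq : pvBestOf key (i :: t) = some ((2, PySem.Str.len (pvName d')), d') := by
                  rw [pvBestOf, hrk, hbt]
                  simp only [pvComb, Option.map_some, hlex]
                  rw [if_pos (decide_eq_true hlt)]
                refine ⟨fun hn => ?_, fun k d hs => ?_⟩
                · rw [hEq] at hn; cases hn
                · rw [hEq] at hs
                  simp only [Option.some.injEq, Prod.mk.injEq] at hs
                  obtain ⟨rfl, rfl⟩ := hs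
                  refine Or.inr (Or.inr ⟨rfl, ?_, ?_, ?_⟩)
                  · rw [List.find?_cons_of_neg (by simpa using h0)]; exact hf0t
                  · rw [List.find?_cons_of_neg (by simpa using h1)]; exact hf1t
                  · rw [hmin2, if_pos hlt]
              · have hEq : pvBestOf key (i :: t) = some ((2, PySem.Str.len (pvName i)), i) := by
                  rw [pvBestOf, hrk, hbt]
                  simp only [pvComb, Option.map_some, hlex]
                  rw [if_neg (show ¬ decide (PySem.Str.len (pvName d') < PySem.Str.len (pvName i)) = true from by simpa using hlt)]
                refine ⟨fun hn => ?_, fun k d hs => ?_⟩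
                · rw [hEq] at hn; cases hn
                · rw [hEq] at hs
                  simp only [Option.some.injEq, Prod.mk.injEq] at hs
                  obtain ⟨rfl, rfl⟩ := hs
                  refine Or.inr (Or.inr ⟨rfl, ?_, ?_, ?_⟩)
                  · rw [List.find?_cons_of_neg (by simpa using h0)]; exact hf0t
                  · rw [List.find?_cons_of_neg (by simpa using h1)]; exact hf1t
                  · rw [hmin2, if_neg hlt]
        · -- no match at the head: the head contributes nothing
          have hrk : pvRk key i = none := by simp only [pvRk]; rw [if_neg h0, if_neg h1, if_neg h2]
          have hEq : pvBestOf key (i :: t) = pvBestOf key t := by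
            rw [pvBestOf, hrk]; rfl
          refine ⟨fun hn => ?_, fun k d hs => ?_⟩
          · rw [hEq] at hn
            obtain ⟨hf0t, hf1t, hfilt⟩ := ih.1 hn
            refine ⟨?_, ?_, ?_⟩
            · rw [List.find?_cons_of_neg (by simpa using h0)]; exact hf0t
            · rw [List.find?_cons_of_neg (by simpa using h1)]; exact hf1t
            · rw [List.filter_cons_of_neg (by simpa using h2)]; exact hfilt
          · rw [hEq] at hs
            rcases ih.2 k d hs with ⟨hk, hf0t⟩ | ⟨hk, hf0t, hf1t⟩ | ⟨hk, hf0t, hf1t, hmint⟩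
            · refine Or.inl ⟨hk, ?_⟩
              rw [List.find?_cons_of_neg (by simpa using h0)]; exact hf0t
            · refine Or.inr (Or.inl ⟨hk, ?_, ?_⟩)
              · rw [List.find?_cons_of_neg (by simpa using h0)]; exact hf0t
              · rw [List.find?_cons_of_neg (by simpa using h1)]; exact hf1t
            · refine Or.inr (Or.inr ⟨hk, ?_, ?_, ?_⟩)
              · rw [List.find?_cons_of_neg (by simpa using h0)]; exact hf0t
              · rw [List.find?_cons_of_neg (by simpa using h1)]; exact hf1t
              · rw [List.filter_cons_of_neg (by simpa using h2)]; exact hmint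

-- ===== VERDICT (by name: the statement is the Claim_ definition above) =====
theorem match_interest_intelligent_py_spec : Claim_equal_match_interest_intelligent_py := by
  intro u ints _hdom
  unfold Spec_match_interest_intelligent_py
  by_cases hg : (!(u != "" && PySem.Str.strip u != "") || ints.isEmpty) = true
  · rw [match_interest_intelligent_py, match_interest_intelligent_py_alt, if_pos hg, if_pos hg]
  · have hstrip : PySem.Str.strip u ≠ "" := by
      intro hx
      apply hg
      rw [hx]
      simp
    have hkey : pvNormalize u ≠ "" := pvKey_ne_empty u hstrip
    rw [match_interest_intelligent_py, match_interest_intelligent_py_alt, if_neg hg, if_neg hg]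
    show _ = (ints.foldl (pvStepB (pvNormalize u)) (none, none)).2
    have hB : ints.foldl (pvStepB (pvNormalize u)) ((none, none) : Option (Nat × Int) × Option (List (String × String)))
        = pvEnc (pvBestOf (pvNormalize u) ints) := pvFoldB (pvNormalize u) ints none
    rw [hB]
    have hspec := pvBestOf_spec (pvNormalize u) ints
    cases hb : pvBestOf (pvNormalize u) ints with
    | none =>
      obtain ⟨hf0, hf1, hfil⟩ := hspec.1 hb
      show (match ints.find? (fun i => pvNormalize (pvName i) == pvNormalize u) with
        | some d => if d.isEmpty then _ else some d
        | none => _) = _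
      rw [hf0, hf1, hfil]
      rfl
    | some kd =>
      obtain ⟨k, d⟩ := kd
      rcases hspec.2 k d hb with ⟨rfl, hf0⟩ | ⟨rfl, hf0, hf1⟩ | ⟨rfl, hf0, hf1, hmin⟩
      · have hne : d ≠ [] := pvP0_ne_nil hkey (by simpa using List.find?_some hf0)
        show (match ints.find? (fun i => pvNormalize (pvName i) == pvNormalize u) with
          | some d => if d.isEmpty then _ else some d
          | none => _) = _
        rw [hf0]
        simp [List.isEmpty_iff, hne, pvEnc]
      · have hne : d ≠ [] := pvP1_ne_nil hkey (by simpa using List.find?_some hf1)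
        show (match ints.find? (fun i => pvNormalize (pvName i) == pvNormalize u) with
          | some d => if d.isEmpty then _ else some d
          | none => _) = _
        rw [hf0, hf1]
        simp [List.isEmpty_iff, hne, pvEnc]
      · have hfne : ints.filter (fun i => PySem.Str.isIn (pvNormalize u) (pvNormalize (pvName i))) ≠ [] := by
          intro hx
          rw [hx] at hmin
          cases hmin
        show (match ints.find? (fun i => pvNormalize (pvName i) == pvNormalize u) with
          | some d => if d.isEmpty then _ else some d
          | none => _) = _
        rw [hf0, hf1]
        simp only [List.isEmpty_iff]
        rw [if_neg hfne]
        rw [hmin]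
        rfl
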